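-- pv_equiv track=rewrite | github.com/yogesh1801/system-intelligence-benchmark | benchmarks/sysmobench/sysmobench_core/tla_eval/evaluation/pgo/trace_validation.py | _prepare_refinement_lines
-- ===== SOURCE A (Python) =====
-- from typing import Dict, Any, List
--
-- def _prepare_refinement_lines(mapping_text: str, task_name: str) -> List[str]:
--     lines = [line.rstrip() for line in mapping_text.splitlines()]
--
--     while lines and not lines[0].strip():
--         lines.pop(0)
--     while lines and not lines[-1].strip():
--         lines.pop()
--
--     instance_line = f"INSTANCE {task_name}"
--     for index, line in enumerate(list(lines)):
--         if line.strip() == instance_line: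
--             lines.pop(index)
--             break
--
--     target_line = f"__instance == INSTANCE {task_name}"
--     cleaned_lines: List[str] = []
--     target_removed = False
--     for line in lines:
--         if not target_removed and line.strip() == target_line:
--             target_removed = True
--             continue
--         cleaned_lines.append(line)
--
--     while cleaned_lines and not cleaned_lines[0].strip():
--         cleaned_lines.pop(0)
--     while cleaned_lines and not cleaned_lines[-1].strip():
--         cleaned_lines.pop()
--
--     return cleaned_lines
-- ===== SOURCE B (Python) =====
-- from typing import List
--
-- def _prepare_refinement_lines(mapping_text: str, task_name: str) -> List[str]:
--     instance_line = f"INSTANCE {task_name}"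
--     target_line = f"__instance == INSTANCE {task_name}"
--     result: List[str] = []
--     seen_instance = False
--     seen_target = False
--     for raw in mapping_text.splitlines():
--         line = raw.rstrip()
--         stripped = line.strip()
--         if not seen_instance and stripped == instance_line:
--             seen_instance = True
--             continue
--         if not seen_target and stripped == target_line:
--             seen_target = True
--             continue
--         result.append(line)
--     idxs = [i for i, line in enumerate(result) if line.strip()]
--     if not idxs:
--         return []
--     return result[idxs[0]:idxs[-1] + 1]
-- ===== Notes on version B (the rewrite author's own statement) =====
-- stated objective: simpler
-- what changed: B computes both target strings up front and removes the first occurrence of each in a single flagged pass over the rstripped lines, then trims outer blank lines once by collecting the indices of non-blank lines and slicing from the first to the last, replacing A's two separate removal scans and four while-pop trim loops.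
import Mathlib
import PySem

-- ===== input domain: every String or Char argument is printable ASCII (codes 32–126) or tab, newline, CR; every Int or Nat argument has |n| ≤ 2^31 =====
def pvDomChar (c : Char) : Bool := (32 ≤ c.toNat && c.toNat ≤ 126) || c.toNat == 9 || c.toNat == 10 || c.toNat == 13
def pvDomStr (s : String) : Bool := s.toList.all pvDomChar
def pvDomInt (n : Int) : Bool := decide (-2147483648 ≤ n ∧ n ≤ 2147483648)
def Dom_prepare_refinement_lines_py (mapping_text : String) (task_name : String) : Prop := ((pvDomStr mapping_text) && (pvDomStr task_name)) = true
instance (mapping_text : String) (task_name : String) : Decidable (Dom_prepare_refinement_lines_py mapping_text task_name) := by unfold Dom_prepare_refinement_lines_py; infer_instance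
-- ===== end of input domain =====

-- B replaces A's two separate removal scans by one flagged pass over the rstripped
-- lines and replaces A's four while-pop blank-trim loops by a single index-and-slice
-- trim; same return value on every input (objective: simpler).

-- ===== PORT A =====
-- `while lines and not lines[0].strip(): lines.pop(0)`
def pvTrimFront : List String → List String
  | [] => []
  | l :: rest => if PySem.Str.strip l == "" then pvTrimFront rest else l :: rest

-- `while lines and not lines[-1].strip(): lines.pop()`
def pvTrimBack : List String → List String
  | [] => []
  | l :: rest =>
    match pvTrimBack rest with
    | [] => if PySem.Str.strip l == "" then [] else [l]
    | r  => l :: r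

-- `for index, line in enumerate(list(lines)): if line.strip() == target: lines.pop(index); break`
def pvRemoveFirst (target : String) : List String → List String
  | [] => []
  | l :: rest => if PySem.Str.strip l == target then rest else l :: pvRemoveFirst target rest

def prepare_refinement_lines_py (mapping_text : String) (task_name : String) : List String :=
  let lines := (PySem.Str.splitlines mapping_text).map PySem.Str.rstrip
  let lines := pvTrimFront lines
  let lines := pvTrimBack lines
  let instance_line := "INSTANCE " ++ task_name
  let lines := pvRemoveFirst instance_line lines
  let target_line := "__instance == INSTANCE " ++ task_name
  -- `for line in lines: …` with the `target_removed` flag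
  let cleaned := (lines.foldl
    (fun (st : List String × Bool) line =>
      if !st.2 && (PySem.Str.strip line == target_line) then (st.1, true)
      else (st.1 ++ [line], st.2)) ([], false)).1
  let cleaned := pvTrimFront cleaned
  pvTrimBack cleaned

-- ===== PORT B =====
def prepare_refinement_lines_py_alt (mapping_text : String) (task_name : String) : List String :=
  let instance_line := "INSTANCE " ++ task_name
  let target_line := "__instance == INSTANCE " ++ task_name
  -- single pass: rstrip each raw line, skip the first occurrence of each special line
  let result := ((PySem.Str.splitlines mapping_text).foldl
    (fun (st : List String × Bool × Bool) raw =>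
      let line := PySem.Str.rstrip raw
      let stripped := PySem.Str.strip line
      if !st.2.1 && (stripped == instance_line) then (st.1, true, st.2.2)
      else if !st.2.2 && (stripped == target_line) then (st.1, st.2.1, true)
      else (st.1 ++ [line], st.2)) ([], false, false)).1
  -- `idxs = [i for i, line in enumerate(result) if line.strip()]`
  let idxs := ((PySem.List.enumerate result).filter
    (fun p => !(PySem.Str.strip p.2 == ""))).map (·.1)
  -- `if not idxs: return []` / `return result[idxs[0]:idxs[-1] + 1]` (defaults never read)
  if idxs.isEmpty then []
  else PySem.List.slice result (some (idxs.headD 0)) (some (idxs.getLastD 0 + 1))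

-- ===== PRECONDITION & SPEC =====
def Spec_prepare_refinement_lines_py (mapping_text : String) (task_name : String) (out : List String) : Prop := out = prepare_refinement_lines_py_alt mapping_text task_name
instance (mapping_text : String) (task_name : String) (out : List String) : Decidable (Spec_prepare_refinement_lines_py mapping_text task_name out) := by unfold Spec_prepare_refinement_lines_py; infer_instance

-- ===== CLAIM (what is proved, stated in full; the proofs are below) =====
def Claim_equal_prepare_refinement_lines_py : Prop := ∀ (mapping_text : String) (task_name : String), Dom_prepare_refinement_lines_py mapping_text task_name → Spec_prepare_refinement_lines_py mapping_text task_name (prepare_refinement_lines_py mapping_text task_name)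


-- ===== LEMMAS AND PROOFS =====

def pvBlank (l : String) : Bool := PySem.Str.strip l == ""

lemma pvTrimFront_eq (L : List String) : pvTrimFront L = L.dropWhile pvBlank := by
  induction L with
  | nil => rfl
  | cons l L ih => simp [pvTrimFront, List.dropWhile_cons, pvBlank, ih]

lemma pvTrimBack_eq (L : List String) :
    pvTrimBack L = (L.reverse.dropWhile pvBlank).reverse := by
  induction L with
  | nil => rfl
  | cons l L ih =>
    rw [List.reverse_cons, List.dropWhile_append]
    rcases h : L.reverse.dropWhile pvBlank with _ | ⟨d, ds⟩
    · simp only [pvTrimBack, ih, h, List.reverse_nil, List.isEmpty_nil, if_true]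
      by_cases hb : (PySem.Str.strip l == "") = true
      · simp [pvBlank, hb]
      · simp only [Bool.not_eq_true] at hb
        simp [pvBlank, hb]
    · simp only [pvTrimBack, ih, h]
      simp

lemma pvRemoveFirst_no_match (t : String) (L : List String)
    (h : ∀ x ∈ L, (PySem.Str.strip x == t) = false) : pvRemoveFirst t L = L := by
  induction L with
  | nil => rfl
  | cons l L ih =>
    have hl := h l (by simp)
    simp [pvRemoveFirst, hl, ih fun x hx => h x (by simp [hx])]

lemma pvRemoveFirst_append_left (t : String) (xs ys : List String)
    (h : ∀ x ∈ xs, (PySem.Str.strip x == t) = false) :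
    pvRemoveFirst t (xs ++ ys) = xs ++ pvRemoveFirst t ys := by
  induction xs with
  | nil => rfl
  | cons x xs ih =>
    have hx := h x (by simp)
    simp [pvRemoveFirst, hx, ih fun a ha => h a (by simp [ha])]

lemma pvRemoveFirst_append_right (t : String) (xs ys : List String)
    (h : ∀ y ∈ ys, (PySem.Str.strip y == t) = false) :
    pvRemoveFirst t (xs ++ ys) = pvRemoveFirst t xs ++ ys := by
  induction xs with
  | nil => simpa using pvRemoveFirst_no_match t ys h
  | cons x xs ih =>
    by_cases hx : (PySem.Str.strip x == t) = true
    · simp [pvRemoveFirst, hx]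
    · simp only [Bool.not_eq_true] at hx
      simp [pvRemoveFirst, hx, ih]

-- A's target-removal fold, with a generalized accumulator
lemma pvFoldA (t : String) (L : List String) : ∀ (acc : List String) (b : Bool),
    (L.foldl
      (fun (st : List String × Bool) line =>
        if !st.2 && (PySem.Str.strip line == t) then (st.1, true)
        else (st.1 ++ [line], st.2)) (acc, b)).1
    = acc ++ (if b then L else pvRemoveFirst t L) := by
  induction L with
  | nil => intro acc b; cases b <;> simp [pvRemoveFirst]
  | cons l L ih =>
    intro acc b
    rw [List.foldl_cons]
    show (List.foldl _
      (if (!b && (PySem.Str.strip l == t)) = true then (acc, true) else (acc ++ [l], b)) L).1 = _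
    by_cases hb : b = true
    · subst hb
      rw [if_neg (by simp), ih]
      simp
    · simp only [Bool.not_eq_true] at hb
      subst hb
      by_cases hl : (PySem.Str.strip l == t) = true
      · rw [if_pos (by simp [hl]), ih]
        simp [pvRemoveFirst, hl]
      · simp only [Bool.not_eq_true] at hl
        rw [if_neg (by simp [hl]), ih]
        simp [pvRemoveFirst, hl]

-- B's single flagged pass = A's two sequential removals (over the rstripped lines)
lemma pvFoldB (ti tt : String) (L : List String) : ∀ (acc : List String) (b1 b2 : Bool),
    (L.foldl
      (fun (st : List String × Bool × Bool) raw =>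
        let line := PySem.Str.rstrip raw
        let stripped := PySem.Str.strip line
        if !st.2.1 && (stripped == ti) then (st.1, true, st.2.2)
        else if !st.2.2 && (stripped == tt) then (st.1, st.2.1, true)
        else (st.1 ++ [line], st.2)) (acc, b1, b2)).1
    = acc ++ (if b2 then (if b1 then L.map PySem.Str.rstrip
                          else pvRemoveFirst ti (L.map PySem.Str.rstrip))
              else pvRemoveFirst tt (if b1 then L.map PySem.Str.rstrip
                          else pvRemoveFirst ti (L.map PySem.Str.rstrip))) := by
  induction L with
  | nil => intro acc b1 b2; cases b1 <;> cases b2 <;> simp [pvRemoveFirst]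
  | cons raw L ih =>
    intro acc b1 b2
    rw [List.foldl_cons]
    show (List.foldl _
      (if (!b1 && (PySem.Str.strip (PySem.Str.rstrip raw) == ti)) = true then (acc, true, b2)
       else if (!b2 && (PySem.Str.strip (PySem.Str.rstrip raw) == tt)) = true then (acc, b1, true)
       else (acc ++ [PySem.Str.rstrip raw], b1, b2)) L).1 = _
    by_cases h1 : b1 = true
    · subst h1
      by_cases ht : (PySem.Str.strip (PySem.Str.rstrip raw) == tt) = true
      · by_cases h2 : b2 = true
        · subst h2
          rw [if_neg (by simp), if_neg (by simp), ih]
          simp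
        · simp only [Bool.not_eq_true] at h2
          subst h2
          rw [if_neg (by simp), if_pos (by simp [ht]), ih]
          simp [pvRemoveFirst, ht]
      · simp only [Bool.not_eq_true] at ht
        by_cases h2 : b2 = true
        · subst h2
          rw [if_neg (by simp), if_neg (by simp), ih]
          simp
        · simp only [Bool.not_eq_true] at h2
          subst h2
          rw [if_neg (by simp), if_neg (by simp [ht]), ih]
          simp [pvRemoveFirst, ht, List.append_assoc]
    · simp only [Bool.not_eq_true] at h1
      subst h1
      by_cases hi : (PySem.Str.strip (PySem.Str.rstrip raw) == ti) = true
      · rw [if_pos (by simp [hi]), ih]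
        simp [pvRemoveFirst, hi]
      · simp only [Bool.not_eq_true] at hi
        by_cases ht : (PySem.Str.strip (PySem.Str.rstrip raw) == tt) = true
        · by_cases h2 : b2 = true
          · subst h2
            rw [if_neg (by simp [hi]), if_neg (by simp), ih]
            simp [pvRemoveFirst, hi]
          · simp only [Bool.not_eq_true] at h2
            subst h2
            rw [if_neg (by simp [hi]), if_pos (by simp [ht]), ih]
            simp [pvRemoveFirst, hi, ht]
        · simp only [Bool.not_eq_true] at ht
          by_cases h2 : b2 = true
          · subst h2
            rw [if_neg (by simp [hi]), if_neg (by simp), ih]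
            simp [pvRemoveFirst, hi, List.append_assoc]
          · simp only [Bool.not_eq_true] at h2
            subst h2
            rw [if_neg (by simp [hi]), if_neg (by simp [ht]), ih]
            simp [pvRemoveFirst, hi, ht, List.append_assoc]

-- positions (as Nats) of the non-blank lines
def pvNatIdxs : List String → List Nat
  | [] => []
  | l :: L => if pvBlank l then (pvNatIdxs L).map (· + 1) else 0 :: (pvNatIdxs L).map (· + 1)

lemma pvEnumIdxs (L : List String) : ∀ (s : Int),
    ((PySem.List.enumerate L s).filter (fun p => !(PySem.Str.strip p.2 == ""))).map (·.1)
      = (pvNatIdxs L).map (fun (n : Nat) => s + (n : Int)) := by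
  induction L with
  | nil => intro s; simp [PySem.List.enumerate_nil, pvNatIdxs]
  | cons l L ih =>
    intro s
    rw [PySem.List.enumerate_cons, List.filter_cons]
    by_cases hb : (PySem.Str.strip l == "") = true
    · have hB : pvBlank l = true := hb
      rw [if_neg (by simp [hb]), ih (s + 1)]
      simp only [pvNatIdxs, hB, if_true, List.map_map]
      apply List.map_congr_left
      intro n _
      simp only [Function.comp_apply]
      push_cast
      ring
    · have hB : pvBlank l = false := by simpa [pvBlank] using hb
      rw [if_pos (by simp [hb])]
      simp only [List.map_cons]
      rw [ih (s + 1)]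
      simp only [pvNatIdxs, hB, Bool.false_eq_true, if_false, List.map_cons, List.map_map]
      congr 1
      · simp
      · apply List.map_congr_left
        intro n _
        simp only [Function.comp_apply]
        push_cast
        ring

lemma pvNatIdxs_nil_iff (L : List String) : pvNatIdxs L = [] ↔ ∀ l ∈ L, pvBlank l := by
  induction L with
  | nil => simp [pvNatIdxs]
  | cons l L ih =>
    by_cases hb : pvBlank l <;> simp [pvNatIdxs, hb, ih]

lemma pvNatIdxs_head (L : List String) : ∀ i0 rest, pvNatIdxs L = i0 :: rest →
    i0 = (L.takeWhile pvBlank).length := by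
  induction L with
  | nil => intro i0 rest h; simp [pvNatIdxs] at h
  | cons l L ih =>
    intro i0 rest h
    by_cases hb : pvBlank l
    · simp only [pvNatIdxs, hb, if_true] at h
      rcases List.map_eq_cons_iff.mp h with ⟨j0, rest0, hL, hj, _⟩
      have := ih j0 rest0 hL
      simp [hb, ← hj, this]
    · simp only [Bool.not_eq_true] at hb
      simp only [pvNatIdxs, hb, Bool.false_eq_true, if_false, List.cons.injEq] at h
      simp [hb, ← h.1]

lemma pvGetLastD_map {α β : Type} (f : α → β) (xs : List α) : ∀ (d : α),
    (xs.map f).getLastD (f d) = f (xs.getLastD d) := by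
  induction xs with
  | nil => intro d; rfl
  | cons x xs ih => intro d; simp only [List.map_cons, List.getLastD_cons, ih]

lemma pvTakeWhile_append_of_witness {α : Type} (p : α → Bool) (xs ys : List α)
    (h : ∃ x ∈ xs, p x = false) : (xs ++ ys).takeWhile p = xs.takeWhile p := by
  induction xs with
  | nil => rcases h with ⟨x, hx, _⟩; simp at hx
  | cons x xs ih =>
    by_cases hx : p x = true
    · have h' : ∃ a ∈ xs, p a = false := by
        rcases h with ⟨a, ha, hpa⟩
        rcases List.mem_cons.mp ha with rfl | ha'
        · rw [hx] at hpa; simp at hpa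
        · exact ⟨a, ha', hpa⟩
      simp [hx, ih h']
    · simp only [Bool.not_eq_true] at hx
      simp [hx]

lemma pvTakeWhile_append_of_all {α : Type} (p : α → Bool) (xs ys : List α)
    (h : ∀ x ∈ xs, p x = true) : (xs ++ ys).takeWhile p = xs ++ ys.takeWhile p := by
  induction xs with
  | nil => simp
  | cons x xs ih =>
    simp [h x (by simp), ih fun a ha => h a (by simp [ha])]

lemma pvLenTakeWhile {α : Type} (p : α → Bool) (l : List α) :
    (l.takeWhile p).length ≤ l.length := by
  have := congrArg List.length (List.takeWhile_append_dropWhile (p := p) (l := l))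
  simp only [List.length_append] at this
  omega

lemma pvNatIdxs_last (L : List String) : ∀ i0 rest, pvNatIdxs L = i0 :: rest →
    rest.getLastD i0 + 1 = L.length - (L.reverse.takeWhile pvBlank).length := by
  induction L with
  | nil => intro i0 rest h; simp [pvNatIdxs] at h
  | cons l L ih =>
    intro i0 rest h
    by_cases hb : pvBlank l
    · simp only [pvNatIdxs, hb, if_true] at h
      rcases List.map_eq_cons_iff.mp h with ⟨j0, rest0, hL, hj, hrest⟩
      have hlast : rest.getLastD i0 = rest0.getLastD j0 + 1 := by
        rw [← hrest, ← hj, pvGetLastD_map]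
      have hwit : ∃ x ∈ L.reverse, pvBlank x = false := by
        have hne : pvNatIdxs L ≠ [] := by simp [hL]
        have := (not_iff_not.mpr (pvNatIdxs_nil_iff L)).mp hne
        simp only [not_forall, exists_prop] at this
        rcases this with ⟨x, hx, hpx⟩
        exact ⟨x, List.mem_reverse.mpr hx, by simpa using hpx⟩
      have htw : ((l :: L).reverse).takeWhile pvBlank = L.reverse.takeWhile pvBlank := by
        rw [List.reverse_cons, pvTakeWhile_append_of_witness _ _ _ hwit]
      have hle : (L.reverse.takeWhile pvBlank).length ≤ L.length := by
        have := pvLenTakeWhile pvBlank L.reverse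
        simpa using this
      have := ih j0 rest0 hL
      rw [htw, hlast]
      simp only [List.length_cons]
      omega
    · simp only [Bool.not_eq_true] at hb
      simp only [pvNatIdxs, hb, Bool.false_eq_true, if_false, List.cons.injEq] at h
      rcases hL : pvNatIdxs L with _ | ⟨j0, rest0⟩
      · have hall : ∀ x ∈ L, pvBlank x := (pvNatIdxs_nil_iff L).mp hL
        have htw : ((l :: L).reverse).takeWhile pvBlank = L.reverse := by
          rw [List.reverse_cons,
            pvTakeWhile_append_of_all _ _ _ (fun x hx => hall x (List.mem_reverse.mp hx))]
          simp [hb]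
        rw [hL] at h
        simp only [List.map_nil] at h
        rw [← h.1, ← h.2, htw]
        simp
      · rw [hL] at h
        simp only [List.map_cons] at h
        have hlast : rest.getLastD i0 = rest0.getLastD j0 + 1 := by
          rw [← h.2, List.getLastD_cons, pvGetLastD_map]
        have hwit : ∃ x ∈ L.reverse, pvBlank x = false := by
          have hne : pvNatIdxs L ≠ [] := by simp [hL]
          have := (not_iff_not.mpr (pvNatIdxs_nil_iff L)).mp hne
          simp only [not_forall, exists_prop] at this
          rcases this with ⟨x, hx, hpx⟩
          exact ⟨x, List.mem_reverse.mpr hx, by simpa using hpx⟩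
        have htw : ((l :: L).reverse).takeWhile pvBlank = L.reverse.takeWhile pvBlank := by
          rw [List.reverse_cons, pvTakeWhile_append_of_witness _ _ _ hwit]
        have hle : (L.reverse.takeWhile pvBlank).length ≤ L.length := by
          have := pvLenTakeWhile pvBlank L.reverse
          simpa using this
        have := ih j0 rest0 hL
        rw [htw, hlast]
        simp only [List.length_cons]
        omega

-- trim-from-the-back, as a take of everything before the reversed blank suffix
lemma pvDropRev {α : Type} (p : α → Bool) (R : List α) :
    (R.dropWhile p).reverse = R.reverse.take (R.length - (R.takeWhile p).length) := by
  have hlen : R.length - (R.takeWhile p).length = (R.dropWhile p).reverse.length := by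
    have := congrArg List.length (List.takeWhile_append_dropWhile (p := p) (l := R))
    simp only [List.length_append] at this
    simp only [List.length_reverse]
    omega
  have h1 : R.reverse = (R.dropWhile p).reverse ++ (R.takeWhile p).reverse := by
    conv_lhs => rw [← List.takeWhile_append_dropWhile (p := p) (l := R)]
    rw [List.reverse_append]
  rw [hlen, h1, List.take_left]

lemma pvRevDrop_eq_take (W : List String) :
    (W.reverse.dropWhile pvBlank).reverse
      = W.take (W.length - (W.reverse.takeWhile pvBlank).length) := by
  have := pvDropRev pvBlank W.reverse
  simpa using this

-- B's index-and-slice trim = A's two trim phases (as one lemma about any list)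
lemma pvSliceTrim_eq (Z : List String) :
    (if (((PySem.List.enumerate Z).filter
          (fun p => !(PySem.Str.strip p.2 == ""))).map (·.1)).isEmpty then []
     else PySem.List.slice Z
        (some ((((PySem.List.enumerate Z).filter
          (fun p => !(PySem.Str.strip p.2 == ""))).map (·.1)).headD 0))
        (some ((((PySem.List.enumerate Z).filter
          (fun p => !(PySem.Str.strip p.2 == ""))).map (·.1)).getLastD 0 + 1)))
      = pvTrimBack (pvTrimFront Z) := by
  have hidx := pvEnumIdxs Z 0
  rcases hI : pvNatIdxs Z with _ | ⟨i0, rest⟩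
  · rw [hI] at hidx
    simp only [List.map_nil] at hidx
    have hall : ∀ l ∈ Z, pvBlank l := (pvNatIdxs_nil_iff Z).mp hI
    have htf : pvTrimFront Z = [] := by
      rw [pvTrimFront_eq]
      exact List.dropWhile_eq_nil_iff.mpr hall
    rw [hidx, htf]
    simp [pvTrimBack]
  · rw [hI] at hidx
    simp only [List.map_cons] at hidx
    rw [hidx]
    simp only [List.isEmpty_cons, List.headD_cons, List.getLastD_cons]
    have hlast : (rest.map (fun (n : Nat) => (0 : Int) + (n : Int))).getLastD ((0 : Int) + (i0 : Int))
        = (0 : Int) + ((rest.getLastD i0 : Nat) : Int) := pvGetLastD_map _ rest i0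
    rw [hlast]
    have hc : (0 : Int) + ((rest.getLastD i0 : Nat) : Int) + 1
        = ((rest.getLastD i0 + 1 : Nat) : Int) := by push_cast; ring
    have h0 : (0 : Int) + (i0 : Int) = ((i0 : Nat) : Int) := by ring
    rw [hc, h0, PySem.List.slice_natCast]
    -- now the RHS
    have hhead := pvNatIdxs_head Z i0 rest hI
    have hlastn := pvNatIdxs_last Z i0 rest hI
    set tw := Z.takeWhile pvBlank with htw
    set W := Z.dropWhile pvBlank with hWdef
    have hZ : Z = tw ++ W := (List.takeWhile_append_dropWhile).symm
    have htf : pvTrimFront Z = W := by rw [pvTrimFront_eq]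
    have hdrop : Z.drop i0 = W := by
      conv_lhs => rw [hZ, hhead]
      exact List.drop_left
    have hwitW : ∃ x ∈ W.reverse, pvBlank x = false := by
      have hne : pvNatIdxs Z ≠ [] := by simp [hI]
      have := (not_iff_not.mpr (pvNatIdxs_nil_iff Z)).mp hne
      simp only [not_forall, exists_prop] at this
      rcases this with ⟨x, hx, hpx⟩
      have hxW : x ∈ W := by
        rw [hZ] at hx
        rcases List.mem_append.mp hx with hx1 | hx2
        · exact absurd (List.mem_takeWhile_imp hx1) (by simpa using hpx)
        · exact hx2
      exact ⟨x, List.mem_reverse.mpr hxW, by simpa using hpx⟩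
    have htwr : Z.reverse.takeWhile pvBlank = W.reverse.takeWhile pvBlank := by
      conv_lhs => rw [hZ]
      rw [List.reverse_append, pvTakeWhile_append_of_witness _ _ _ hwitW]
    have hlen : tw.length + W.length = Z.length := by
      have := congrArg List.length hZ
      simp only [List.length_append] at this
      omega
    have hleW : (W.reverse.takeWhile pvBlank).length ≤ W.length := by
      have := pvLenTakeWhile pvBlank W.reverse
      simpa using this
    rw [htf, pvTrimBack_eq, pvRevDrop_eq_take, hdrop]
    rw [htwr] at hlastn
    have harith : rest.getLastD i0 + 1 - i0
        = W.length - (W.reverse.takeWhile pvBlank).length := by omega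
    rw [harith]
    simp

-- removals only ever hit a non-blank line: the matched pattern is a non-empty string
lemma pvBlank_no_match (t : String) (ht : t ≠ "") (x : String) (hx : pvBlank x) :
    (PySem.Str.strip x == t) = false := by
  simp only [pvBlank, beq_iff_eq] at hx
  simp only [beq_eq_false_iff_ne, hx]
  exact fun h => ht h.symm

lemma pvAppend_ne_empty (a b : String) (h : a.toList ≠ []) : a ++ b ≠ "" := by
  intro hab
  have h2 := congrArg String.toList hab
  simp at h2
  exact h (by simp [h2.1])

-- outer blank-trim absorbs an inner blank-trim around blank-line-safe removals
lemma pvTrimFront_blank_append (xs Z : List String) (h : ∀ x ∈ xs, pvBlank x) :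
    pvTrimFront (xs ++ Z) = pvTrimFront Z := by
  rw [pvTrimFront_eq, pvTrimFront_eq, List.dropWhile_append]
  rw [List.dropWhile_eq_nil_iff.mpr h]
  rfl

lemma pvTrims_append_blank (Z xs : List String) (h : ∀ x ∈ xs, pvBlank x) :
    pvTrimBack (pvTrimFront (Z ++ xs)) = pvTrimBack (pvTrimFront Z) := by
  rw [pvTrimFront_eq, pvTrimFront_eq, List.dropWhile_append]
  rcases hD : Z.dropWhile pvBlank with _ | ⟨d, ds⟩
  · simp only [List.isEmpty_nil, if_true]
    rw [List.dropWhile_eq_nil_iff.mpr h]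
  · simp only [List.isEmpty_cons, Bool.false_eq_true, if_false]
    rw [pvTrimBack_eq, pvTrimBack_eq, List.reverse_append, List.dropWhile_append]
    rw [List.dropWhile_eq_nil_iff.mpr (fun x hx => h x (List.mem_reverse.mp hx))]
    simp

-- ===== VERDICT (by name: the statement is the Claim_ definition above) =====
theorem prepare_refinement_lines_py_spec : Claim_equal_prepare_refinement_lines_py := by
  intro mt tn _
  unfold Spec_prepare_refinement_lines_py
  simp only [prepare_refinement_lines_py, prepare_refinement_lines_py_alt]
  rw [pvFoldA, pvFoldB]
  simp only [Bool.false_eq_true, if_false, List.nil_append]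
  rw [pvSliceTrim_eq]
  set ti := "INSTANCE " ++ tn with hti_def
  set tt := "__instance == INSTANCE " ++ tn with htt_def
  set M := (PySem.Str.splitlines mt).map PySem.Str.rstrip with hM
  have hti : ti ≠ "" := pvAppend_ne_empty _ _ (by decide)
  have htt : tt ≠ "" := pvAppend_ne_empty _ _ (by decide)
  have hblanks : ∀ x ∈ M.takeWhile pvBlank, pvBlank x = true :=
    fun x hx => List.mem_takeWhile_imp hx
  have hfront : pvTrimBack (pvTrimFront (pvRemoveFirst tt (pvRemoveFirst ti M)))
      = pvTrimBack (pvTrimFront (pvRemoveFirst tt (pvRemoveFirst ti (M.dropWhile pvBlank)))) := by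
    conv_lhs => rw [← List.takeWhile_append_dropWhile (p := pvBlank) (l := M)]
    rw [pvRemoveFirst_append_left ti _ _
        (fun x hx => pvBlank_no_match ti hti x (hblanks x hx)),
      pvRemoveFirst_append_left tt _ _
        (fun x hx => pvBlank_no_match tt htt x (hblanks x hx)),
      pvTrimFront_blank_append _ _ hblanks]
  have hdecomp : M.dropWhile pvBlank
      = pvTrimBack (M.dropWhile pvBlank)
        ++ ((M.dropWhile pvBlank).reverse.takeWhile pvBlank).reverse := by
    have h1 : (M.dropWhile pvBlank).reverse
        = (M.dropWhile pvBlank).reverse.takeWhile pvBlank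
          ++ (M.dropWhile pvBlank).reverse.dropWhile pvBlank :=
      (List.takeWhile_append_dropWhile).symm
    calc M.dropWhile pvBlank = (M.dropWhile pvBlank).reverse.reverse :=
          (List.reverse_reverse _).symm
      _ = ((M.dropWhile pvBlank).reverse.takeWhile pvBlank
          ++ (M.dropWhile pvBlank).reverse.dropWhile pvBlank).reverse :=
          congrArg List.reverse h1
      _ = ((M.dropWhile pvBlank).reverse.dropWhile pvBlank).reverse
          ++ ((M.dropWhile pvBlank).reverse.takeWhile pvBlank).reverse :=
          List.reverse_append
      _ = pvTrimBack (M.dropWhile pvBlank)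
          ++ ((M.dropWhile pvBlank).reverse.takeWhile pvBlank).reverse := by
          rw [pvTrimBack_eq]
  have hbs : ∀ x ∈ ((M.dropWhile pvBlank).reverse.takeWhile pvBlank).reverse, pvBlank x = true :=
    fun x hx => List.mem_takeWhile_imp (List.mem_reverse.mp hx)
  have hback : pvTrimBack (pvTrimFront (pvRemoveFirst tt (pvRemoveFirst ti (M.dropWhile pvBlank))))
      = pvTrimBack (pvTrimFront (pvRemoveFirst tt (pvRemoveFirst ti
          (pvTrimBack (M.dropWhile pvBlank))))) := by
    conv_lhs => rw [hdecomp]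
    rw [pvRemoveFirst_append_right ti _ _
        (fun y hy => pvBlank_no_match ti hti y (hbs y hy)),
      pvRemoveFirst_append_right tt _ _
        (fun y hy => pvBlank_no_match tt htt y (hbs y hy)),
      pvTrims_append_blank _ _ hbs]
  rw [pvTrimFront_eq M, ← hback, ← hfront]
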